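-- pv_equiv track=rewrite | github.com/Aivydb21/Uncle_mays | investor-outreach/scripts/firecrawl-enrich-s3-s6.py | extract_thesis_notes
-- ===== SOURCE A (Python) =====
-- def extract_thesis_notes(markdown: str, org_name: str, max_chars: int = 600) -> str:
--     """Extract the most relevant 1-2 paragraphs about thesis/mission/programs."""
--     if not markdown:
--         return f"Firecrawl returned empty content for {org_name}."
--
--     # Look for mission-relevant sections
--     keywords = [
--         "mission", "focus", "invest", "grant", "program", "food", "community",
--         "support", "fund", "eligib", "priority", "thesis", "portfolio",
--         "black", "bipoc", "equity", "access", "produce", "agriculture",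
--     ]
--
--     lines = markdown.split("\n")
--     scored_lines: list[tuple[int, str]] = []
--     for line in lines:
--         line = line.strip()
--         if not line or len(line) < 30:
--             continue
--         # Skip nav/boilerplate lines
--         if line.startswith("#") and len(line) < 50:
--             continue
--         score = sum(1 for kw in keywords if kw.lower() in line.lower())
--         if score > 0:
--             scored_lines.append((score, line))
--
--     scored_lines.sort(key=lambda x: -x[0])
--
--     # Take top lines up to max_chars
--     selected = []
--     total = 0
--     for _, line in scored_lines[:8]:
--         if total + len(line) > max_chars:
--             break
--         selected.append(line)
--         total += len(line)
--
--     if not selected: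
--         # Fall back to first 600 chars of markdown
--         return markdown[:max_chars].strip()
--
--     notes = " | ".join(selected[:3])
--     return f"[Firecrawl {org_name}] {notes}"
-- ===== SOURCE B (Python) =====
-- def extract_thesis_notes(markdown: str, org_name: str, max_chars: int = 600) -> str:
--     """Sort-free variant: comprehension filter, bucket-walk ranking, recursive budget pick."""
--     if not markdown:
--         return f"Firecrawl returned empty content for {org_name}."
--
--     keywords = [
--         "mission", "focus", "invest", "grant", "program", "food", "community",
--         "support", "fund", "eligib", "priority", "thesis", "portfolio",
--         "black", "bipoc", "equity", "access", "produce", "agriculture",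
--     ]
--
--     def judge(raw):
--         ln = raw.strip()
--         if len(ln) < 30 or (ln.startswith("#") and len(ln) < 50):
--             return None
--         sc = sum(1 for kw in keywords if kw in ln.lower())
--         return (sc, ln) if sc > 0 else None
--
--     qual = [p for p in map(judge, markdown.split("\n")) if p is not None]
--     ranked = [ln for s in range(len(keywords), 0, -1) for sc, ln in qual if sc == s]
--
--     def pick(rest, budget):
--         if not rest or len(rest[0]) > budget:
--             return []
--         return [rest[0]] + pick(rest[1:], budget - len(rest[0]))
--
--     selected = pick(ranked[:8], max_chars)
--     if not selected:
--         return markdown[:max_chars].strip()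
--     return f"[Firecrawl {org_name}] " + " | ".join(selected[:3])
-- ===== Notes on version B (the rewrite author's own statement) =====
-- stated objective: alternative
-- what changed: Replaces A's append-loop + stable sort(key=-score) + break-flag budget loop with a filterMap-style judge over the lines, a sort-free bucket walk over scores 19..1 that rebuilds the ranking by repeated filtering, and a recursive greedy pick of the char budget.
import Mathlib
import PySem

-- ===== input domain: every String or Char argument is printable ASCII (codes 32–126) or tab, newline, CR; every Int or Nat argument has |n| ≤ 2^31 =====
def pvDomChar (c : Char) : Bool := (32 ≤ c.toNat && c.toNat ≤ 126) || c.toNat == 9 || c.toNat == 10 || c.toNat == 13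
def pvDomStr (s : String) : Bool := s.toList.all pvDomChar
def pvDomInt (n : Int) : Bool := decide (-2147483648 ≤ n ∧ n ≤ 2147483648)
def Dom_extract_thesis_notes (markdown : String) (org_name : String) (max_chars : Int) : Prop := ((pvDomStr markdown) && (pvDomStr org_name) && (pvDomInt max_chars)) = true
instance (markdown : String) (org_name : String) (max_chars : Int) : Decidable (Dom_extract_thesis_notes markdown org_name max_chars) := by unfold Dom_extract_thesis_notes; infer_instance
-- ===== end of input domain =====

-- B drops A's stable sort(key=-score): a filterMap keeps qualifying lines, a bucket walk
-- over scores 19..1 rebuilds the ranking, and a recursive pick spends the char budget;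
-- objective: alternative (same cost class).

-- the keyword list both Pythons contain verbatim
def pvKeywords : List String :=
  ["mission", "focus", "invest", "grant", "program", "food", "community",
   "support", "fund", "eligib", "priority", "thesis", "portfolio",
   "black", "bipoc", "equity", "access", "produce", "agriculture"]

-- ===== PORT A =====
-- A: score = sum(1 for kw in keywords if kw.lower() in line.lower())
def pvScore (line : String) : Int :=
  pvKeywords.foldl (fun n kw =>
    if PySem.Str.isIn (PySem.Str.lower kw) (PySem.Str.lower line) = true then n + 1 else n) 0

-- A's line-scan loop body: append (score, line) for qualifying lines
def pvABody (acc : List (Int × String)) (line0 : String) : List (Int × String) :=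
  if PySem.Str.strip line0 = "" ∨ PySem.Str.len (PySem.Str.strip line0) < 30 then acc
  else if PySem.Str.startswith (PySem.Str.strip line0) "#" = true ∧ PySem.Str.len (PySem.Str.strip line0) < 50 then acc
  else if pvScore (PySem.Str.strip line0) > 0 then
    acc ++ [(pvScore (PySem.Str.strip line0), PySem.Str.strip line0)] else acc

def extract_thesis_notes (markdown : String) (org_name : String) (max_chars : Int) : String :=
  if markdown = "" then
    "Firecrawl returned empty content for " ++ org_name ++ "."
  else
    let lines := (PySem.Str.split? markdown "\n").getD []
    let scored : List (Int × String) := lines.foldl pvABody []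
    let sortedL := PySem.List.sorted scored (fun p => -p.1) false
    let sel := (PySem.List.slice sortedL none (some 8)).foldl
      (fun (st : List String × Int × Bool) p =>
        if st.2.2 then st
        else if st.2.1 + PySem.Str.len p.2 > max_chars then (st.1, st.2.1, true)
        else (st.1 ++ [p.2], st.2.1 + PySem.Str.len p.2, false)) ([], 0, false)
    if sel.1 = [] then PySem.Str.strip (PySem.Str.slice markdown none (some max_chars))
    else "[Firecrawl " ++ org_name ++ "] " ++
      PySem.Str.join " | " (PySem.List.slice sel.1 none (some 3))

-- ===== PORT B =====
-- B: judge(raw) = None for non-qualifying lines, else (score, stripped line)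
def pvJudge (raw : String) : Option (Int × String) :=
  let ln := PySem.Str.strip raw
  if PySem.Str.len ln < 30 ∨ (PySem.Str.startswith ln "#" = true ∧ PySem.Str.len ln < 50) then
    none
  else
    let sc : Int := (pvKeywords.countP (fun kw => PySem.Str.isIn kw (PySem.Str.lower ln)) : Int)
    if sc > 0 then some (sc, ln) else none

-- B: pick(rest, budget) — recursive greedy walk of the char budget
def pvPick : List String → Int → List String
  | [], _ => []
  | ln :: rest, budget =>
    if PySem.Str.len ln > budget then []
    else ln :: pvPick rest (budget - PySem.Str.len ln)

def extract_thesis_notes_alt (markdown : String) (org_name : String) (max_chars : Int) : String :=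
  if markdown = "" then
    "Firecrawl returned empty content for " ++ org_name ++ "."
  else
    let qual : List (Int × String) :=
      ((PySem.Str.split? markdown "\n").getD []).filterMap pvJudge
    let ranked : List String :=
      (PySem.List.pyRange (PySem.List.len pvKeywords) 0 (-1)).flatMap
        (fun s => qual.filterMap (fun p => if p.1 == s then some p.2 else none))
    let selected := pvPick (PySem.List.slice ranked none (some 8)) max_chars
    if selected = [] then PySem.Str.strip (PySem.Str.slice markdown none (some max_chars))
    else "[Firecrawl " ++ org_name ++ "] " ++
      PySem.Str.join " | " (PySem.List.slice selected none (some 3))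

-- ===== PRECONDITION & SPEC =====
def Spec_extract_thesis_notes (markdown : String) (org_name : String) (max_chars : Int) (out : String) : Prop := out = extract_thesis_notes_alt markdown org_name max_chars
instance (markdown : String) (org_name : String) (max_chars : Int) (out : String) : Decidable (Spec_extract_thesis_notes markdown org_name max_chars out) := by unfold Spec_extract_thesis_notes; infer_instance

-- ===== CLAIM (what is proved, stated in full; the proofs are below) =====
def Claim_equal_extract_thesis_notes : Prop := ∀ (markdown : String) (org_name : String) (max_chars : Int), Dom_extract_thesis_notes markdown org_name max_chars → Spec_extract_thesis_notes markdown org_name max_chars (extract_thesis_notes markdown org_name max_chars)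

-- ===== LEMMAS AND PROOFS =====

-- keywords are already lowercase, so A's kw.lower() is the identity on them
lemma pvLower_keywords : ∀ kw ∈ pvKeywords, PySem.Str.lower kw = kw := by decide

lemma pvScore_eq (ln : String) :
    pvScore ln = (pvKeywords.countP (fun kw => PySem.Str.isIn kw (PySem.Str.lower ln)) : Int) := by
  unfold pvScore
  rw [PySem.List.foldl_if_add_one]
  have : pvKeywords.countP (fun kw => PySem.Str.isIn (PySem.Str.lower kw) (PySem.Str.lower ln)) =
      pvKeywords.countP (fun kw => PySem.Str.isIn kw (PySem.Str.lower ln)) := by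
    apply List.countP_congr
    intro kw hkw
    rw [pvLower_keywords kw hkw]
  rw [this]
  simp

lemma pvScore_nonneg_le (line : String) : 0 ≤ pvScore line ∧ pvScore line ≤ 19 := by
  rw [pvScore_eq]
  have h := List.countP_le_length
    (p := fun kw => PySem.Str.isIn kw (PySem.Str.lower line)) (l := pvKeywords)
  have hl : pvKeywords.length = 19 := rfl
  omega

-- A's scan-loop body appends exactly what B's judge yields
lemma pvStep (acc : List (Int × String)) (line0 : String) :
    pvABody acc line0 = acc ++ (pvJudge line0).toList := by
  unfold pvABody pvJudge
  simp only [pvScore_eq]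
  have hstrip : PySem.Str.strip line0 = "" → PySem.Str.len (PySem.Str.strip line0) < 30 := by
    intro h; rw [h]; decide
  by_cases h30 : PySem.Str.len (PySem.Str.strip line0) < 30
  · rw [if_pos (Or.inr h30), if_pos (Or.inl h30)]
    simp
  · have hcond : ¬ (PySem.Str.strip line0 = "" ∨ PySem.Str.len (PySem.Str.strip line0) < 30) := by
      rintro (h | h)
      · exact h30 (hstrip h)
      · exact h30 h
    by_cases hhash : PySem.Str.startswith (PySem.Str.strip line0) "#" = true ∧
        PySem.Str.len (PySem.Str.strip line0) < 50
    · rw [if_neg hcond, if_pos hhash, if_pos (Or.inr hhash)]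
      simp
    · have hr : ¬ (PySem.Str.len (PySem.Str.strip line0) < 30 ∨
          PySem.Str.startswith (PySem.Str.strip line0) "#" = true ∧
            PySem.Str.len (PySem.Str.strip line0) < 50) := by
        rintro (h | h)
        · exact h30 h
        · exact hhash h
      rw [if_neg hcond, if_neg hhash, if_neg hr]
      by_cases hsc : ((pvKeywords.countP
          (fun kw => PySem.Str.isIn kw (PySem.Str.lower (PySem.Str.strip line0)))) : Int) > 0
      · rw [if_pos hsc, if_pos hsc]
        simp
      · rw [if_neg hsc, if_neg hsc]
        simp

-- B's filterMap of judge is A's scan loop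
lemma pvQual_eq (lines : List String) (acc : List (Int × String)) :
    lines.foldl pvABody acc = acc ++ lines.filterMap pvJudge := by
  induction lines generalizing acc with
  | nil => simp
  | cons line0 rest ih =>
    rw [List.foldl_cons, pvStep, ih, List.filterMap_cons]
    cases pvJudge line0 <;> simp

-- every scored pair has 1 ≤ score ≤ 19
lemma pvScored_bounds (lines : List String) (acc : List (Int × String))
    (h : ∀ p ∈ acc, 1 ≤ p.1 ∧ p.1 ≤ 19) :
    ∀ p ∈ lines.foldl pvABody acc, 1 ≤ p.1 ∧ p.1 ≤ 19 := by
  induction lines generalizing acc with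
  | nil => exact h
  | cons line0 rest ih =>
    simp only [List.foldl_cons]
    apply ih
    intro p hp
    unfold pvABody at hp
    split_ifs at hp with h1 h2 h3
    · exact h p hp
    · exact h p hp
    · rcases List.mem_append.mp hp with hp | hp
      · exact h p hp
      · have hb := pvScore_nonneg_le (PySem.Str.strip line0)
        rw [List.mem_singleton] at hp
        have hp1 : p.1 = pvScore (PySem.Str.strip line0) := by rw [hp]
        rw [hp1]
        exact ⟨by omega, hb.2⟩
    · exact h p hp

-- insertBy passes over a block it does not insert before
lemma pvInsertBy_append {α : Type} (before : α → α → Bool) (x : α) (l1 l2 : List α)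
    (h : ∀ y ∈ l1, before x y = false) :
    PySem.List.insertBy before x (l1 ++ l2) = l1 ++ PySem.List.insertBy before x l2 := by
  induction l1 with
  | nil => simp
  | cons y t ih =>
    have hy : before x y = false := h y (by simp)
    simp only [List.cons_append, PySem.List.insertBy, hy, Bool.false_eq_true, if_false]
    rw [ih (fun z hz => h z (by simp [hz]))]

lemma pvInsertBy_front {α : Type} (before : α → α → Bool) (x : α) (l : List α)
    (h : ∀ y ∈ l, before x y = true) :
    PySem.List.insertBy before x l = x :: l := by
  cases l with
  | nil => rfl
  | cons y t =>
    have hy : before x y = true := h y (by simp)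
    simp [PySem.List.insertBy, hy]

-- inserting x into the bucket decomposition lands at the end of its own bucket
lemma pvInsert_flatMap (x : Int × String) (ss : List Int)
    (hss : ss.Pairwise (fun a b => b < a)) (hx : x.1 ∈ ss) (xs : List (Int × String)) :
    PySem.List.insertBy (fun a b => decide ((fun p : Int × String => -p.1) a < (fun p : Int × String => -p.1) b)) x
        (ss.flatMap (fun s => xs.filter (fun p => p.1 == s))) =
      ss.flatMap (fun s => (xs ++ [x]).filter (fun p => p.1 == s)) := by
  induction ss with
  | nil => cases hx
  | cons s ss' ih =>
    rw [List.pairwise_cons] at hss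
    simp only [List.flatMap_cons]
    by_cases hxs : x.1 = s
    · rw [pvInsertBy_append _ _ _ _ ?hpass, pvInsertBy_front _ _ _ ?hfront]
      case hpass =>
        intro y hy
        have : y.1 = s := by simpa [beq_iff_eq] using (List.mem_filter.mp hy).2
        simp [this, hxs]
      case hfront =>
        intro y hy
        simp only [List.mem_flatMap, List.mem_filter, beq_iff_eq] at hy
        obtain ⟨s', hs', _, hy2⟩ := hy
        have : s' < s := hss.1 s' hs'
        simp only [decide_eq_true_eq]
        omega
      have hbucket : (xs ++ [x]).filter (fun p => p.1 == s) =
          xs.filter (fun p => p.1 == s) ++ [x] := by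
        rw [List.filter_append]
        simp [hxs]
      have hrest : ss'.flatMap (fun s => (xs ++ [x]).filter (fun p => p.1 == s)) =
          ss'.flatMap (fun s => xs.filter (fun p => p.1 == s)) := by
        apply List.flatMap_congr
        intro s' hs'
        have hne : x.1 ≠ s' := by
          have : s' < s := hss.1 s' hs'
          omega
        rw [List.filter_append]
        simp [beq_iff_eq, hne]
      rw [hbucket, hrest]
      simp
    · have hx' : x.1 ∈ ss' := by
        rcases List.mem_cons.mp hx with h' | h'
        · exact absurd h' hxs
        · exact h'
      have hlt : x.1 < s := hss.1 _ hx'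
      rw [pvInsertBy_append _ _ _ _ ?hpass2, ih hss.2 hx']
      case hpass2 =>
        intro y hy
        have : y.1 = s := by simpa [beq_iff_eq] using (List.mem_filter.mp hy).2
        simp only [decide_eq_false_iff_not]
        omega
      have hbucket : (xs ++ [x]).filter (fun p => p.1 == s) =
          xs.filter (fun p => p.1 == s) := by
        rw [List.filter_append]
        simp [beq_iff_eq, hxs]
      rw [hbucket]

-- the stable sort by -score is the concatenation of the score buckets, highest first
lemma pvSorted_buckets (ss : List Int) (hss : ss.Pairwise (fun a b => b < a))
    (L : List (Int × String)) (h : ∀ p ∈ L, p.1 ∈ ss) :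
    PySem.List.sorted L (fun p => -p.1) false =
      ss.flatMap (fun s => L.filter (fun p => p.1 == s)) := by
  induction L using List.reverseRecOn with
  | nil =>
    rw [PySem.List.sorted_eq_foldl_insertBy]
    simp
  | append_singleton xs x ih =>
    rw [PySem.List.sorted_eq_foldl_insertBy, List.foldl_append, List.foldl_cons, List.foldl_nil,
      ← PySem.List.sorted_eq_foldl_insertBy,
      ih (fun p hp => h p (List.mem_append_left _ hp))]
    exact pvInsert_flatMap x ss hss (h x (by simp)) xs

lemma pvMem19 (k : Int) (h1 : 1 ≤ k) (h2 : k ≤ 19) :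
    k ∈ ([19, 18, 17, 16, 15, 14, 13, 12, 11, 10, 9, 8, 7, 6, 5, 4, 3, 2, 1] : List Int) := by
  interval_cases k <;> decide

-- filterMap with an if-some is filter-then-map
lemma pvFilterMap_if (s : Int) (l : List (Int × String)) :
    l.filterMap (fun p => if p.1 == s then some p.2 else none) =
      (l.filter (fun p => p.1 == s)).map Prod.snd := by
  induction l with
  | nil => rfl
  | cons p t ih =>
    by_cases hp : (p.1 == s) = true
    · have h1 : (if (p.1 == s) = true then some p.2 else none) = some p.2 := if_pos hp
      simp only [List.filterMap_cons, List.filter_cons, h1, if_pos hp, List.map_cons]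
      rw [ih]
    · have h1 : (if (p.1 == s) = true then some p.2 else none) = none := if_neg hp
      simp only [List.filterMap_cons, List.filter_cons, h1, if_neg hp]
      exact ih

-- B's bucket walk equals A's stable sort, projected to the lines
lemma pvRanked_eq (lines : List String) :
    (PySem.List.pyRange (PySem.List.len pvKeywords) 0 (-1)).flatMap
        (fun s => (lines.filterMap pvJudge).filterMap (fun p => if p.1 == s then some p.2 else none)) =
      (PySem.List.sorted (lines.foldl pvABody []) (fun p => -p.1) false).map Prod.snd := by
  have hr : PySem.List.pyRange (PySem.List.len pvKeywords) 0 (-1) =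
      [19, 18, 17, 16, 15, 14, 13, 12, 11, 10, 9, 8, 7, 6, 5, 4, 3, 2, 1] := by decide
  have hbound := pvScored_bounds lines [] (by intro p hp; cases hp)
  have hq : lines.filterMap pvJudge = lines.foldl pvABody [] := by
    rw [pvQual_eq]; simp
  rw [hr, pvSorted_buckets [19, 18, 17, 16, 15, 14, 13, 12, 11, 10, 9, 8, 7, 6, 5, 4, 3, 2, 1]
    (by decide) _ (fun p hp => pvMem19 p.1 (hbound p hp).1 (hbound p hp).2)]
  rw [List.map_flatMap]
  exact List.flatMap_congr (fun s _ => by rw [hq, pvFilterMap_if])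

-- once A's break flag is set the fold is constant
lemma pvFold_flag (l : List (Int × String)) (mc : Int) (sel : List String) (t : Int) :
    l.foldl (fun (st : List String × Int × Bool) p =>
        if st.2.2 then st
        else if st.2.1 + PySem.Str.len p.2 > mc then (st.1, st.2.1, true)
        else (st.1 ++ [p.2], st.2.1 + PySem.Str.len p.2, false)) (sel, t, true) = (sel, t, true) := by
  induction l with
  | nil => rfl
  | cons p rest ih => simp only [List.foldl_cons, if_true]; exact ih

-- A's budget fold produces B's recursive pick
lemma pvGreedy_pick (l : List (Int × String)) (mc : Int) (sel : List String) (t : Int) :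
    (l.foldl (fun (st : List String × Int × Bool) p =>
        if st.2.2 then st
        else if st.2.1 + PySem.Str.len p.2 > mc then (st.1, st.2.1, true)
        else (st.1 ++ [p.2], st.2.1 + PySem.Str.len p.2, false)) (sel, t, false)).1 =
      sel ++ pvPick (l.map Prod.snd) (mc - t) := by
  induction l generalizing sel t with
  | nil => simp [pvPick]
  | cons p rest ih =>
    simp only [List.foldl_cons, List.map_cons]
    by_cases hb : t + PySem.Str.len p.2 > mc
    · have hb' : PySem.Str.len p.2 > mc - t := by omega
      simp only [hb, if_true, Bool.false_eq_true, if_false, pvPick, hb', pvFold_flag]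
      simp
    · have hb' : ¬ PySem.Str.len p.2 > mc - t := by omega
      simp only [hb, if_false, Bool.false_eq_true, pvPick, hb', ih]
      simp only [List.append_assoc, List.singleton_append]
      have harith : mc - (t + PySem.Str.len p.2) = mc - t - PySem.Str.len p.2 := by omega
      rw [harith]

-- ===== VERDICT (by name: the statement is the Claim_ definition above) =====
theorem extract_thesis_notes_spec : Claim_equal_extract_thesis_notes := by
  intro markdown org_name max_chars _
  unfold Spec_extract_thesis_notes extract_thesis_notes extract_thesis_notes_alt
  by_cases hm : markdown = ""
  · simp [hm]
  · have hslice : ∀ (L : List (Int × String)),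
        (PySem.List.slice L none (some 8)).map Prod.snd =
          PySem.List.slice (L.map Prod.snd) none (some 8) := by
      intro L
      rw [PySem.List.slice_to (xs := L) (b := 8) (by norm_num),
        PySem.List.slice_to (xs := L.map Prod.snd) (b := 8) (by norm_num), List.map_take]
    simp only [hm, if_false]
    rw [pvGreedy_pick]
    simp only [List.nil_append, sub_zero]
    rw [hslice, ← pvRanked_eq]
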